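-- pv_equiv track=rewrite | github.com/chanshin0/AlgoStudy_saffy8 | algorithm study/1016_baekjoon_challenge_9019.py | push_R
-- ===== SOURCE A (Python) =====
-- def push_R(n):
--     if len(str(n)) == 1:
--         return n
--     else:
--         lst_n = list(str(n))
--         rst = lst_n[-1]
--         for i in lst_n[:-1]:
--             rst += i
--
--         while rst[0] == '0':
--             rst = rst[1:]
--
--         return int(rst)
-- ===== SOURCE B (Python) =====
-- def push_R(n):
--     d = len(str(n))
--     return (n % 10) * 10 ** (d - 1) + n // 10
-- ===== Notes on version B (the rewrite author's own statement) =====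
-- stated objective: simpler
-- what changed: replaces A's string rotation (list(str(n)), a char-append loop, a leading-zero strip loop and an int() reparse) with a closed-form arithmetic expression — last digit times a power of ten plus the remaining digits — which absorbs leading zeros automatically
import Mathlib
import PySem

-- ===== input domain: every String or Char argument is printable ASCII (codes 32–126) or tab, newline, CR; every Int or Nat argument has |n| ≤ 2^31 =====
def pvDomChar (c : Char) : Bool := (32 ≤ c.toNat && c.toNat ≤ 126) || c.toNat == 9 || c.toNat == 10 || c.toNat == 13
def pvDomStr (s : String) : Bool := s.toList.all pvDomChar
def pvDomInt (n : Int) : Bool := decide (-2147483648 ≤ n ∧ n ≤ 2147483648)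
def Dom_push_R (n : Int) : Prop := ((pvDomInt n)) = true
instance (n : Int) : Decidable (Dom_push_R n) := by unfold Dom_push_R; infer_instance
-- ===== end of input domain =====

-- B replaces A's string rotation (build digit list, append loop, strip-zeros loop, int() reparse)
-- with a closed-form arithmetic expression on the digits (objective: simpler).


-- ===== PORT A =====
-- the `while rst[0] == '0': rst = rst[1:]` loop of A; on [] Python would raise IndexError,
-- but rst is never empty (str(n) of a multi-digit n always contains a non-'0' before the end)
def pushRStrip : List Char → List Char
  | [] => []
  | c :: rest => if c == '0' then pushRStrip rest else c :: rest

def push_R (n : Int) : Int :=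
  if PySem.Str.len (PySem.Int.toStr n) == 1 then n
  else
    let lst_n := (PySem.Int.toStr n).toList                      -- list(str(n))
    let c := (PySem.List.pyGet? lst_n (-1)).getD '0'             -- rst = lst_n[-1] (str(n) is nonempty, so never none)
    let rst := (PySem.List.slice lst_n none (some (-1))).foldl (fun acc i => acc ++ [i]) [c]
                                                                 -- for i in lst_n[:-1]: rst += i
    let rst := pushRStrip rst                                    -- while rst[0] == '0': rst = rst[1:]
    (PySem.Int.ofChars? rst).getD 0                              -- int(rst); ValueError (= none) only outside Pre_

-- ===== PORT B =====
def push_R_alt (n : Int) : Int :=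
  let d := PySem.Str.len (PySem.Int.toStr n)                     -- d = len(str(n))
  PySem.Int.mod n 10 * 10 ^ (d - 1).toNat + PySem.Int.floordiv n 10
                                                                 -- (n % 10) * 10 ** (d - 1) + n // 10; d ≥ 1, so .toNat is exact

-- ===== PRECONDITION & SPEC =====
-- Pre_ excludes exactly the inputs on which A raises: negative n whose last digit is nonzero,
-- where int() is applied to a malformed string such as '2-1' (ValueError). Negative n ending in
-- the digit zero stay inside Pre_: there A returns normally (the rotated leading zero is
-- stripped, leaving a parseable negative literal).
def Pre_push_R (n : Int) : Prop := 0 ≤ n ∨ PySem.Int.mod n 10 = 0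
instance (n : Int) : Decidable (Pre_push_R n) := by unfold Pre_push_R; infer_instance
def pvWitness_push_R : Int := 302

def Spec_push_R (n : Int) (out : Int) : Prop := out = push_R_alt n
instance (n : Int) (out : Int) : Decidable (Spec_push_R n out) := by unfold Spec_push_R; infer_instance

-- ===== CLAIM (what is proved, stated in full; the proofs are below) =====
def Claim_equal_push_R : Prop := ∀ (n : Int), Dom_push_R n → Pre_push_R n → Spec_push_R n (push_R n)

-- ===== LEMMAS AND PROOFS =====

-- value of a decimal digit list read left to right, starting from accumulator a
def valFrom (a : Nat) (cs : List Char) : Nat :=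
  cs.foldl (fun acc c => acc * 10 + (c.toNat - 48)) a

theorem valFrom_cons (a : Nat) (c : Char) (cs : List Char) :
    valFrom a (c :: cs) = valFrom (a * 10 + (c.toNat - 48)) cs := by simp [valFrom]

theorem valFrom_append (a : Nat) (xs : List Char) (c : Char) :
    valFrom a (xs ++ [c]) = valFrom a xs * 10 + (c.toNat - 48) := by
  simp [valFrom, List.foldl_append]

theorem digitChar_isDigit {m : Nat} (h : m < 10) : (Nat.digitChar m).isDigit = true := by
  interval_cases m <;> decide

theorem digitChar_toNat {m : Nat} (h : m < 10) : (Nat.digitChar m).toNat - 48 = m := by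
  interval_cases m <;> decide

theorem digitChar_ne_zero {m : Nat} (h0 : 0 < m) (h : m < 10) : (Nat.digitChar m == '0') = false := by
  interval_cases m <;> decide

theorem toDigits_isDigit {m : Nat} {c : Char} (hm : c ∈ Nat.toDigits 10 m) : c.isDigit = true :=
  Nat.isDigit_of_mem_toDigits (by norm_num) (by norm_num) hm

theorem valFrom_toDigits (m : Nat) : ∀ a : Nat,
    valFrom a (Nat.toDigits 10 m) = a * 10 ^ (Nat.toDigits 10 m).length + m := by
  induction m using Nat.strong_induction_on with
  | _ m ih =>
    intro a
    by_cases hm : m < 10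
    · rw [Nat.toDigits_of_lt_base hm]
      simp [valFrom, digitChar_toNat hm]
    · rw [Nat.toDigits_of_base_le (by norm_num) (by omega)]
      rw [valFrom_append, ih (m / 10) (by omega) a]
      rw [List.length_append]
      rw [digitChar_toNat (Nat.mod_lt _ (by norm_num))]
      simp only [List.length_singleton]
      have h1 : (a * 10 ^ (Nat.toDigits 10 (m / 10)).length + m / 10) * 10 + m % 10
          = a * (10 ^ (Nat.toDigits 10 (m / 10)).length * 10) + (m / 10 * 10 + m % 10) := by ring
      rw [h1, pow_succ]
      congr 1
      omega

theorem toDigits_head_ne_zero {m : Nat} (hm : 0 < m) {c : Char} {cs : List Char}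
    (h : Nat.toDigits 10 m = c :: cs) : (c == '0') = false := by
  induction m using Nat.strong_induction_on generalizing c cs with
  | _ m ih =>
    by_cases h10 : m < 10
    · rw [Nat.toDigits_of_lt_base h10] at h
      cases h
      exact digitChar_ne_zero hm h10
    · rw [Nat.toDigits_of_base_le (by norm_num) (by omega)] at h
      obtain ⟨c', cs', hcc⟩ : ∃ c' cs', Nat.toDigits 10 (m / 10) = c' :: cs' := by
        cases hd : Nat.toDigits 10 (m / 10) with
        | nil => exact absurd hd (by have := @Nat.length_toDigits_pos 10 (m / 10); intro h; simp [h] at this)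
        | cons a b => exact ⟨a, b, rfl⟩
      rw [hcc] at h
      simp only [List.cons_append, List.cons.injEq] at h
      obtain ⟨rfl, -⟩ := h
      exact ih (m / 10) (by omega) (by omega) hcc

-- A's strip loop is a no-op on a list whose head is not '0'
theorem pushRStrip_noop {c : Char} {cs : List Char} (h : (c == '0') = false) :
    pushRStrip (c :: cs) = c :: cs := by
  simp [pushRStrip, h]

theorem pushRStrip_toDigits {m : Nat} (hm : 0 < m) :
    pushRStrip (Nat.toDigits 10 m) = Nat.toDigits 10 m := by
  cases hd : Nat.toDigits 10 m with
  | nil => rfl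
  | cons c cs => exact pushRStrip_noop (toDigits_head_ne_zero hm hd)

-- digit characters are not int()-whitespace
theorem isIntSpace_of_isDigit {x : Char} (h : x.isDigit = true) : PySem.Int.isIntSpace x = false := by
  simp only [PySem.Int.isIntSpace, Bool.or_eq_false_iff, decide_eq_false_iff_not]
  refine ⟨⟨⟨⟨⟨?_, ?_⟩, ?_⟩, ?_⟩, ?_⟩, ?_⟩ <;> (rintro rfl; exact absurd h (by decide))

-- int(s) on a nonempty string of decimal digits; proved by reducing PySem's (private) parser
-- loop inside the goal: `conv => whnf` exposes one step, then induction over the digit list.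
theorem ofChars_digits : ∀ (c : Char) (cs : List Char), c.isDigit = true →
    (∀ x ∈ cs, x.isDigit = true) →
    PySem.Int.ofChars? (c :: cs) = some ((valFrom 0 (c :: cs) : Nat) : Int) := by
  intro c cs hc hall
  have hall' : ∀ x ∈ c :: cs, PySem.Int.isIntSpace x = false := by
    intro x hx
    rcases hx with _ | hx
    · exact isIntSpace_of_isDigit hc
    · exact isIntSpace_of_isDigit (hall _ ‹_›)
  have h1 : List.dropWhile PySem.Int.isIntSpace (c :: cs) = c :: cs := by
    rw [List.dropWhile_eq_self_iff]
    intro _; simp only [List.getElem_cons_zero]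
    simp [isIntSpace_of_isDigit hc]
  have h2 : List.dropWhile PySem.Int.isIntSpace (c :: cs).reverse = (c :: cs).reverse := by
    rw [List.dropWhile_eq_self_iff]
    intro hl h
    have hmem : ((c :: cs).reverse)[0] ∈ c :: cs := by
      have := List.getElem_mem (l := (c :: cs).reverse) (n := 0) hl
      exact (List.mem_reverse).1 this
    have := hall' _ hmem
    simp only [this] at h
    cases h
  rw [PySem.Int.ofChars?.eq_1]
  simp only [h1, h2, List.reverse_reverse]
  split
  next ds heq =>
    injection heq with ha hb
    subst ha
    exact absurd hc (by decide)
  next ds heq =>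
    injection heq with ha hb
    subst ha
    exact absurd hc (by decide)
  next ds h3 h4 =>
    simp only [bind, Option.map_bind, Option.bind_eq_some_iff]
    refine ⟨valFrom 0 (c :: cs), ?_, by simp⟩
    clear h1 h2 h3 h4 hall' ds
    conv => lhs; whnf
    cases hI : instDecidableEqBool c.isDigit true with
    | isFalse h => exact absurd hc h
    | isTrue h =>
    conv => lhs; whnf
    rw [valFrom_cons, show ('0' : Char).toNat = 48 from rfl]
    generalize 0 * 10 + (c.toNat - 48) = a
    clear hI h hc c
    revert hall
    induction cs generalizing a with
    | nil => intro _; rfl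
    | cons c' cs' ih =>
      intro hall
      have hc' : c'.isDigit = true := hall c' (List.mem_cons_self)
      conv => lhs; whnf
      cases hI : instDecidableEqBool c'.isDigit true with
      | isFalse h => exact absurd hc' h
      | isTrue h =>
      conv => lhs; whnf
      rw [valFrom_cons, show ('0' : Char).toNat = 48 from rfl]
      exact ih _ (fun x hx => hall x (List.mem_cons_of_mem _ hx))

-- int('-' + s) for a nonempty all-digit s (the negative-multiple-of-10 path of A)
theorem ofChars_neg_digits : ∀ (c : Char) (cs : List Char), c.isDigit = true →
    (∀ x ∈ cs, x.isDigit = true) →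
    PySem.Int.ofChars? ('-' :: c :: cs) = some (-((valFrom 0 (c :: cs) : Nat) : Int)) := by
  intro c cs hc hall
  have hall' : ∀ x ∈ '-' :: c :: cs, PySem.Int.isIntSpace x = false := by
    intro x hx
    rcases List.mem_cons.1 hx with rfl | hx
    · decide
    rcases List.mem_cons.1 hx with rfl | hx
    · exact isIntSpace_of_isDigit hc
    · exact isIntSpace_of_isDigit (hall _ hx)
  have h1 : List.dropWhile PySem.Int.isIntSpace ('-' :: c :: cs) = '-' :: c :: cs := by
    rw [List.dropWhile_eq_self_iff]
    intro _
    simp only [List.getElem_cons_zero]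
    decide
  have h2 : List.dropWhile PySem.Int.isIntSpace ('-' :: c :: cs).reverse = ('-' :: c :: cs).reverse := by
    rw [List.dropWhile_eq_self_iff]
    intro hl h
    have hmem : (('-' :: c :: cs).reverse)[0] ∈ '-' :: c :: cs := by
      have := List.getElem_mem (l := ('-' :: c :: cs).reverse) (n := 0) hl
      exact (List.mem_reverse).1 this
    have := hall' _ hmem
    simp only [this] at h
    cases h
  rw [PySem.Int.ofChars?.eq_1]
  simp only [h1, h2, List.reverse_reverse]
  simp only [bind, Option.map_bind, Option.bind_eq_some_iff]
  refine ⟨valFrom 0 (c :: cs), ?_, by simp⟩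
  conv => lhs; whnf
  cases hI : instDecidableEqBool c.isDigit true with
  | isFalse h => exact absurd hc h
  | isTrue h =>
  conv => lhs; whnf
  rw [valFrom_cons, show ('0' : Char).toNat = 48 from rfl]
  generalize 0 * 10 + (c.toNat - 48) = a
  clear hI h hc c h1 h2 hall'
  revert hall
  induction cs generalizing a with
  | nil => intro _; rfl
  | cons c' cs' ih =>
    intro hall
    have hc' : c'.isDigit = true := hall c' (List.mem_cons_self)
    conv => lhs; whnf
    cases hI : instDecidableEqBool c'.isDigit true with
    | isFalse h => exact absurd hc' h
    | isTrue h =>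
    conv => lhs; whnf
    rw [valFrom_cons, show ('0' : Char).toNat = 48 from rfl]
    exact ih _ (fun x hx => hall x (List.mem_cons_of_mem _ hx))


theorem len_toDigits_one {N : Nat} (h : N < 10) : (Nat.toDigits 10 N).length = 1 := by
  have h1 := @Nat.length_toDigits_pos 10 N
  have h2 := (Nat.length_toDigits_le_iff (b := 10) (n := N) (k := 1) (by norm_num) (by norm_num)).2 (by simpa using h)
  omega

theorem len_toDigits_two {N : Nat} (h : ¬ N < 10) : 2 ≤ (Nat.toDigits 10 N).length := by
  by_contra hc
  have h1 := @Nat.length_toDigits_pos 10 N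
  have := (Nat.length_toDigits_le_iff (b := 10) (n := N) (k := 1) (by norm_num) (by norm_num)).1 (by omega)
  simp at this; omega

theorem toChars_natCast (N : Nat) : PySem.Int.toChars (N : Int) = Nat.toDigits 10 N := by
  simp [PySem.Int.toChars, Int.not_lt.2 (Int.natCast_nonneg N)]

theorem toChars_neg {n : Int} (hn : n < 0) : PySem.Int.toChars n = '-' :: Nat.toDigits 10 n.natAbs := by
  simp [PySem.Int.toChars, hn]

theorem toDigits_cons (m : Nat) : ∃ c cs, Nat.toDigits 10 m = c :: cs := by
  cases hd : Nat.toDigits 10 m with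
  | nil => exact absurd hd (by have := @Nat.length_toDigits_pos 10 m; intro h; simp [h] at this)
  | cons a b => exact ⟨a, b, rfl⟩

-- A = B for nonnegative n
theorem mod10_natCast (N : Nat) : PySem.Int.mod (N : Int) 10 = ((N % 10 : Nat) : Int) := by
  exact_mod_cast PySem.Int.mod_natCast N 10

theorem floordiv10_natCast (N : Nat) : PySem.Int.floordiv (N : Int) 10 = ((N / 10 : Nat) : Int) := by
  exact_mod_cast PySem.Int.floordiv_natCast N 10

theorem push_R_eq_nonneg (N : Nat) : push_R (N : Int) = push_R_alt (N : Int) := by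
  have hlen : PySem.Str.len (PySem.Int.toStr (N : Int)) = ((Nat.toDigits 10 N).length : Int) := by
    rw [PySem.Str.len_eq, PySem.Int.toList_toStr, toChars_natCast]
  simp only [push_R, push_R_alt, PySem.Int.toList_toStr, toChars_natCast, hlen]
  by_cases hN : N < 10
  · rw [if_pos (by simp [len_toDigits_one hN])]
    rw [len_toDigits_one hN]
    rw [mod10_natCast, floordiv10_natCast]
    have h3 : N % 10 = N := Nat.mod_eq_of_lt hN
    have h4 : N / 10 = 0 := Nat.div_eq_of_lt hN
    simp [h3, h4]
  · have hL2 := len_toDigits_two hN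
    rw [if_neg (by simp; omega)]
    have hsplit : Nat.toDigits 10 N = Nat.toDigits 10 (N / 10) ++ [Nat.digitChar (N % 10)] :=
      Nat.toDigits_of_base_le (by norm_num) (by omega)
    have hM : 0 < N / 10 := by omega
    have hr : N % 10 < 10 := Nat.mod_lt _ (by norm_num)
    rw [hsplit, PySem.List.pyGet?_neg_one_append_singleton, PySem.List.slice_to_neg_one,
        List.dropLast_concat]
    simp only [Option.getD_some, PySem.List.foldl_append_singleton]
    rw [mod10_natCast, floordiv10_natCast]
    have hlenD : (Nat.toDigits 10 (N / 10)).length = (Nat.toDigits 10 N).length - 1 := by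
      rw [hsplit]; simp
    by_cases hr0 : N % 10 = 0
    · rw [hr0]
      show (PySem.Int.ofChars? (pushRStrip ([] ++ '0' :: Nat.toDigits 10 (N / 10)))).getD 0 = _
      simp only [List.nil_append]
      rw [show pushRStrip ('0' :: Nat.toDigits 10 (N / 10)) = pushRStrip (Nat.toDigits 10 (N / 10)) from by simp [pushRStrip]]
      rw [pushRStrip_toDigits hM]
      obtain ⟨c0, cs0, hD⟩ := toDigits_cons (N / 10)
      rw [hD, ofChars_digits c0 cs0 (toDigits_isDigit (hD ▸ List.mem_cons_self))
            (fun x hx => toDigits_isDigit (hD ▸ List.mem_cons_of_mem _ hx))]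
      rw [← hD]
      have := valFrom_toDigits (N / 10) 0
      simp only [Option.getD_some, this, zero_mul, zero_add]
      simp
    · have hne : (Nat.digitChar (N % 10) == '0') = false := digitChar_ne_zero (by omega) hr
      simp only [List.singleton_append]
      rw [pushRStrip_noop hne]
      rw [ofChars_digits _ _ (digitChar_isDigit hr) (fun x hx => toDigits_isDigit hx)]
      rw [valFrom_cons]
      rw [show 0 * 10 + ((N % 10).digitChar.toNat - 48) = N % 10 from by
            rw [digitChar_toNat hr]; omega]
      rw [valFrom_toDigits]
      simp only [Option.getD_some, List.length_append, List.length_cons, List.length_nil]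
      rw [show ((((Nat.toDigits 10 (N / 10)).length + (0 + 1) : Nat) : Int) - 1).toNat
            = (Nat.toDigits 10 (N / 10)).length from by omega]
      push_cast
      ring


-- A = B for negative n ending in the digit zero (A strips the rotated leading zero into '-<digits>')
theorem push_R_eq_negmul (n : Int) (hn : n < 0) (hm : PySem.Int.mod n 10 = 0) :
    push_R n = push_R_alt n := by
  have hdvd : (10 : Int) ∣ n := (PySem.Int.mod_eq_zero_iff_dvd n 10).1 hm
  have hdos : (10 : Nat) ∣ n.natAbs := by
    rcases hdvd with ⟨k, hk⟩
    exact ⟨k.natAbs, by rw [hk]; simp [Int.natAbs_mul]⟩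
  have hNpos : 0 < n.natAbs := by omega
  have hN10 : 10 ≤ n.natAbs := by omega
  have hr0 : n.natAbs % 10 = 0 := by omega
  have hchars : PySem.Int.toChars n = '-' :: Nat.toDigits 10 n.natAbs := toChars_neg hn
  have hlen : PySem.Str.len (PySem.Int.toStr n) = (((Nat.toDigits 10 n.natAbs).length + 1 : Nat) : Int) := by
    rw [PySem.Str.len_eq, PySem.Int.toList_toStr, hchars]; simp
  have hLpos := @Nat.length_toDigits_pos 10 n.natAbs
  simp only [push_R, push_R_alt, PySem.Int.toList_toStr, hchars, hlen]
  rw [if_neg (by simp only [beq_iff_eq]; omega)]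
  have hsplit : Nat.toDigits 10 n.natAbs = Nat.toDigits 10 (n.natAbs / 10) ++ ['0'] := by
    have := Nat.toDigits_of_base_le (b := 10) (n := n.natAbs) (by norm_num) (by omega)
    rwa [hr0] at this
  have hM : 0 < n.natAbs / 10 := by omega
  rw [hsplit, show ('-' :: (Nat.toDigits 10 (n.natAbs / 10) ++ ['0']))
        = ('-' :: Nat.toDigits 10 (n.natAbs / 10)) ++ ['0'] from by simp]
  rw [PySem.List.pyGet?_neg_one_append_singleton, PySem.List.slice_to_neg_one, List.dropLast_concat]
  simp only [Option.getD_some, PySem.List.foldl_append_singleton, List.singleton_append]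
  rw [show pushRStrip ('0' :: '-' :: Nat.toDigits 10 (n.natAbs / 10))
        = '-' :: Nat.toDigits 10 (n.natAbs / 10) from by simp [pushRStrip]]
  obtain ⟨c0, cs0, hD⟩ := toDigits_cons (n.natAbs / 10)
  rw [hD, ofChars_neg_digits c0 cs0 (toDigits_isDigit (hD ▸ List.mem_cons_self))
        (fun x hx => toDigits_isDigit (hD ▸ List.mem_cons_of_mem _ hx)), ← hD]
  rw [valFrom_toDigits]
  simp only [Option.getD_some, zero_mul, zero_add, hm]
  rw [PySem.Int.floordiv_eq_ediv_of_pos (by norm_num)]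
  have h1 : ((n.natAbs / 10 : Nat) : Int) = (n.natAbs : Int) / 10 :=
    Nat.ToInt.div_congr rfl rfl
  omega

-- ===== VERDICT (by name: the statement is the Claim_ definition above) =====
theorem push_R_spec : Claim_equal_push_R := by
  intro n _ hpre
  unfold Spec_push_R
  rcases hpre with hn | hm
  · obtain ⟨N, rfl⟩ : ∃ N : Nat, n = (N : Int) := ⟨n.toNat, (Int.toNat_of_nonneg hn).symm⟩
    exact push_R_eq_nonneg N
  · by_cases hn : 0 ≤ n
    · obtain ⟨N, rfl⟩ : ∃ N : Nat, n = (N : Int) := ⟨n.toNat, (Int.toNat_of_nonneg hn).symm⟩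
      exact push_R_eq_nonneg N
    · exact push_R_eq_negmul n (by omega) hm
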